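-- pv_equiv track=rewrite | github.com/kritikataank/21CSL46 | Hey.py | min_messages_to_remove
-- ===== SOURCE A (Python) =====
-- def min_messages_to_remove(N, msgList):
--     msgList.sort()  # Sort the list of message lengths in ascending order.
--     min_messages_removed = N  # Initialize the minimum number of messages to remove with the maximum value.
--
--     for i in range(N):
--         # For each possible starting point, calculate the maximum length of a message in the selected sequence.
--         max_length = msgList[i] * 2
--
--         # Use binary search to find the index of the first message that exceeds the max_length.
--         left, right = i, N - 1
--         while left <= right:
--             mid = (left + right) // 2
--             if msgList[mid] <= max_length:
--                 left = mid + 1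
--             else:
--                 right = mid - 1
--
--         # Calculate the number of messages to remove from both ends.
--         messages_removed = i + (N - left)
--
--         # Update the minimum number of messages to remove.
--         min_messages_removed = min(min_messages_removed, messages_removed)
--
--     return min_messages_removed
-- ===== SOURCE B (Python) =====
-- def min_messages_to_remove(N, msgList):
--     # Simpler: instead of a hand-written binary search per start index,
--     # directly count the messages keepable from each start. (Sorts msgList
--     # in place, like the original.)
--     msgList.sort()
--     best = N
--     for i in range(N):
--         limit = 2 * msgList[i]
--         kept = sum(1 for j in range(i, N) if msgList[j] <= limit)
--         if N - kept < best:
--             best = N - kept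
--     return best
-- ===== Notes on version B (the rewrite author's own statement) =====
-- stated objective: simpler
-- what changed: Replaces the per-start hand-written binary search with a direct linear count of the messages keepable from each start index (O(N^2) instead of O(N log N), but shorter and plainer).
import Mathlib
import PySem

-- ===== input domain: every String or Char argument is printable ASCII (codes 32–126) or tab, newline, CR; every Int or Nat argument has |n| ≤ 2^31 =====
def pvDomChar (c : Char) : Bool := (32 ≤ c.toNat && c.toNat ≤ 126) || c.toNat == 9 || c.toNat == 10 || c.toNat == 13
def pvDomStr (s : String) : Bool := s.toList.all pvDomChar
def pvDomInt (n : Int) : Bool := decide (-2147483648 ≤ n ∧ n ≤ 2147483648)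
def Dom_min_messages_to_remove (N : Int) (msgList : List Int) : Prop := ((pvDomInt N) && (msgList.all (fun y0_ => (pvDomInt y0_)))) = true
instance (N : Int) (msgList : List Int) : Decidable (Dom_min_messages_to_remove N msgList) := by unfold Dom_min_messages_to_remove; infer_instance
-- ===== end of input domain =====

-- B replaces A's per-start hand-written binary search by a direct linear count of keepable
-- messages (simpler, not faster). Both Pythons sort msgList in place; equivalence here is
-- about the return value (the mutation is identical anyway).

-- ===== PORT A =====
-- A's inner 'while left <= right' binary-search loop, step for step.
def pvBsearchA (xs : List Int) (maxLength left right : Int) : Int :=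
  if h : left ≤ right then
    let mid := PySem.Int.floordiv (left + right) 2
    if PySem.List.pyGetD xs mid 0 ≤ maxLength then
      pvBsearchA xs maxLength (mid + 1) right
    else
      pvBsearchA xs maxLength left (mid - 1)
  else left
termination_by (right + 1 - left).toNat
decreasing_by
  · have := PySem.Int.floordiv_two_mid_bounds h
    omega
  · have := PySem.Int.floordiv_two_mid_bounds h
    omega

def min_messages_to_remove (N : Int) (msgList : List Int) : Int :=
  let s := PySem.List.sorted msgList (fun x => x) false
  (PySem.List.pyRange 0 N 1).foldl
    (fun acc i =>
      let maxLength := (PySem.List.pyGetD s i 0) * 2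
      let left := pvBsearchA s maxLength i (N - 1)
      let removed := i + (N - left)
      min acc removed) N

-- ===== PORT B =====
def min_messages_to_remove_alt (N : Int) (msgList : List Int) : Int :=
  let s := PySem.List.sorted msgList (fun x => x) false
  (PySem.List.pyRange 0 N 1).foldl
    (fun best i =>
      let limit := 2 * PySem.List.pyGetD s i 0
      let kept : Int :=
        ((PySem.List.pyRange i N 1).map
          (fun j => if PySem.List.pyGetD s j 0 ≤ limit then (1 : Int) else 0)).sum
      if N - kept < best then N - kept else best) N

-- ===== PRECONDITION & SPEC =====
-- Pre_ excludes exactly N > len(msgList), where A's msgList[i]/msgList[mid] raises IndexError.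
def Pre_min_messages_to_remove (N : Int) (msgList : List Int) : Prop :=
  N ≤ (msgList.length : Int)
instance (N : Int) (msgList : List Int) : Decidable (Pre_min_messages_to_remove N msgList) := by
  unfold Pre_min_messages_to_remove; infer_instance

def pvWitness_min_messages_to_remove : Int × List Int := (3, [1, 2, 5])

def Spec_min_messages_to_remove (N : Int) (msgList : List Int) (out : Int) : Prop := out = min_messages_to_remove_alt N msgList
instance (N : Int) (msgList : List Int) (out : Int) : Decidable (Spec_min_messages_to_remove N msgList out) := by unfold Spec_min_messages_to_remove; infer_instance

-- ===== CLAIM (what is proved, stated in full; the proofs are below) =====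
def Claim_equal_min_messages_to_remove : Prop := ∀ (N : Int) (msgList : List Int), Dom_min_messages_to_remove N msgList → Pre_min_messages_to_remove N msgList → Spec_min_messages_to_remove N msgList (min_messages_to_remove N msgList)

-- ===== LEMMAS AND PROOFS =====

-- Sorted lists are monotone under safe indexing.
theorem pvGetD_mono (xs : List Int) (hs : xs.Pairwise (· ≤ ·)) (a b : Int)
    (ha : 0 ≤ a) (hab : a ≤ b) (hb : b < (xs.length : Int)) :
    PySem.List.pyGetD xs a 0 ≤ PySem.List.pyGetD xs b 0 := by
  rw [PySem.List.pyGetD_eq_getElem xs 0 ha (by omega),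
      PySem.List.pyGetD_eq_getElem xs 0 (by omega) hb]
  rcases eq_or_lt_of_le hab with h | h
  · subst h; exact le_refl _
  · exact List.pairwise_iff_getElem.mp hs a.toNat b.toNat (by omega) (by omega) (by omega)

-- A's binary search on a sorted list returns l plus the number of indices j ∈ [l, r+1)
-- whose element is ≤ maxLength.
theorem pvBsearchA_eq (xs : List Int) (hs : xs.Pairwise (· ≤ ·)) (m : Int) :
    ∀ (k : Nat) (l r : Int), (r + 1 - l).toNat = k → 0 ≤ l → l ≤ r + 1 → r < (xs.length : Int) →
    pvBsearchA xs m l r =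
      l + (((PySem.List.pyRange l (r + 1) 1).countP
              (fun j => decide (PySem.List.pyGetD xs j 0 ≤ m))) : Int) := by
  intro k
  induction k using Nat.strong_induction_on with
  | _ k ih =>
    intro l r hk hl hlr hr
    rw [pvBsearchA]
    by_cases h : l ≤ r
    · simp only [dif_pos h]
      have hmid := PySem.Int.floordiv_two_mid_bounds h
      set mid := PySem.Int.floordiv (l + r) 2 with hmiddef
      by_cases hle : PySem.List.pyGetD xs mid 0 ≤ m
      · simp only [if_pos hle]
        rw [ih (r + 1 - (mid + 1)).toNat (by omega) (mid + 1) r rfl (by omega) (by omega) hr]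
        have hsplit : PySem.List.pyRange l (r + 1) 1 =
            PySem.List.pyRange l (mid + 1) 1 ++ PySem.List.pyRange (mid + 1) (r + 1) 1 :=
          PySem.List.pyRange_one_append l (mid + 1) (r + 1) (by omega) (by omega)
        rw [hsplit, List.countP_append]
        have hall : (PySem.List.pyRange l (mid + 1) 1).countP
            (fun j => decide (PySem.List.pyGetD xs j 0 ≤ m)) =
            (PySem.List.pyRange l (mid + 1) 1).length := by
          apply List.countP_eq_length.mpr
          intro j hj
          have hj' := (PySem.List.mem_pyRange_one).mp hj
          simp only [decide_eq_true_eq]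
          exact le_trans (pvGetD_mono xs hs j mid (by omega) (by omega) (by omega)) hle
        rw [hall, PySem.List.length_pyRange_one]
        push_cast
        omega
      · simp only [if_neg hle]
        rw [ih (mid - 1 + 1 - l).toNat (by omega) l (mid - 1) rfl hl (by omega) (by omega)]
        have hsplit : PySem.List.pyRange l (r + 1) 1 =
            PySem.List.pyRange l mid 1 ++ PySem.List.pyRange mid (r + 1) 1 :=
          PySem.List.pyRange_one_append l mid (r + 1) (by omega) (by omega)
        rw [hsplit, List.countP_append]
        have hnone : (PySem.List.pyRange mid (r + 1) 1).countP
            (fun j => decide (PySem.List.pyGetD xs j 0 ≤ m)) = 0 := by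
          apply List.countP_eq_zero.mpr
          intro j hj
          have hj' := (PySem.List.mem_pyRange_one).mp hj
          simp only [decide_eq_true_eq]
          intro hjle
          exact hle (le_trans (pvGetD_mono xs hs mid j (by omega) (by omega) (by omega)) hjle)
        have : mid - 1 + 1 = mid := by omega
        rw [this, hnone]
        omega
    · simp only [dif_neg h]
      have : PySem.List.pyRange l (r + 1) 1 = [] := PySem.List.pyRange_one_eq_nil (by omega)
      rw [this]
      simp

-- The 0/1 generator sum in B is a countP.
theorem pvKept_eq (s : List Int) (i N limit : Int) :
    ((PySem.List.pyRange i N 1).map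
        (fun j => if PySem.List.pyGetD s j 0 ≤ limit then (1 : Int) else 0)).sum =
      (((PySem.List.pyRange i N 1).countP
          (fun j => decide (PySem.List.pyGetD s j 0 ≤ limit))) : Int) := by
  induction PySem.List.pyRange i N 1 with
  | nil => simp
  | cons x xs ihx =>
    simp only [List.map_cons, List.sum_cons, List.countP_cons, ihx]
    by_cases h : PySem.List.pyGetD s x 0 ≤ limit <;> simp [h]
    omega

theorem min_messages_to_remove_spec : Claim_equal_min_messages_to_remove := by
  unfold Claim_equal_min_messages_to_remove
  intro N msgList _hdom hpre
  unfold Spec_min_messages_to_remove min_messages_to_remove min_messages_to_remove_alt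
  have hlen : ((PySem.List.sorted msgList (fun x => x) false).length : Int) = (msgList.length : Int) := by
    rw [PySem.List.length_sorted]
  have hs : (PySem.List.sorted msgList (fun x => x) false).Pairwise (· ≤ ·) :=
    PySem.List.sorted_pairwise msgList (fun x => x)
  set s := PySem.List.sorted msgList (fun x => x) false with hsdef
  apply PySem.List.foldl_congr_mem
  intro acc i hi
  have hi' := (PySem.List.mem_pyRange_one).mp hi
  have hNlen : N ≤ (s.length : Int) := by rw [hlen]; exact hpre
  have hb := pvBsearchA_eq s hs (PySem.List.pyGetD s i 0 * 2) (N - 1 + 1 - i).toNat i (N - 1)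
      rfl (by omega) (by omega) (by omega)
  simp only [hb]
  rw [pvKept_eq]
  have hrw : N - 1 + 1 = N := by omega
  rw [hrw]
  set c := (((PySem.List.pyRange i N 1).countP
      (fun j => decide (PySem.List.pyGetD s j 0 ≤ PySem.List.pyGetD s i 0 * 2))) : Int) with hc
  have hcomm : (PySem.List.pyRange i N 1).countP
      (fun j => decide (PySem.List.pyGetD s j 0 ≤ 2 * PySem.List.pyGetD s i 0)) =
      (PySem.List.pyRange i N 1).countP
      (fun j => decide (PySem.List.pyGetD s j 0 ≤ PySem.List.pyGetD s i 0 * 2)) := by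
    apply List.countP_congr
    intro j _
    simp [mul_comm]
  rw [hcomm, ← hc]
  omega
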